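-- pv_equiv track=rewrite | github.com/SmobexS/Recherche_information_DSC | traitement_file.py | stop_word_processing
-- ===== SOURCE A (Python) =====
-- def stop_word_processing(process, stop_list):
--     stop_words_in_index=[]
--     for term in process[0].items():
--         if term[0] in stop_list:
--             stop_words_in_index.append(term[0])
--
--     for term in stop_words_in_index :
--         del process[0][term]
--         del process[1][term]
--     return process
-- ===== SOURCE B (Python) =====
-- def stop_word_processing(process, stop_list):
--     removed = set(stop_list).intersection(process[0])
--     if removed:
--         process[0] = {k: v for k, v in process[0].items() if k not in removed}
--         process[1] = {k: v for k, v in process[1].items() if k not in removed}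
--     return process
-- ===== Notes on version B (the rewrite author's own statement) =====
-- stated objective: alternative
-- what changed: Instead of collecting matching terms into a list and deleting them one by one from both dicts, B computes the removal set once as set(stop_list).intersection(process[0]) and rebuilds the two dicts by a single comprehension each (replacing the slots, not deleting in place).
import Mathlib
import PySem

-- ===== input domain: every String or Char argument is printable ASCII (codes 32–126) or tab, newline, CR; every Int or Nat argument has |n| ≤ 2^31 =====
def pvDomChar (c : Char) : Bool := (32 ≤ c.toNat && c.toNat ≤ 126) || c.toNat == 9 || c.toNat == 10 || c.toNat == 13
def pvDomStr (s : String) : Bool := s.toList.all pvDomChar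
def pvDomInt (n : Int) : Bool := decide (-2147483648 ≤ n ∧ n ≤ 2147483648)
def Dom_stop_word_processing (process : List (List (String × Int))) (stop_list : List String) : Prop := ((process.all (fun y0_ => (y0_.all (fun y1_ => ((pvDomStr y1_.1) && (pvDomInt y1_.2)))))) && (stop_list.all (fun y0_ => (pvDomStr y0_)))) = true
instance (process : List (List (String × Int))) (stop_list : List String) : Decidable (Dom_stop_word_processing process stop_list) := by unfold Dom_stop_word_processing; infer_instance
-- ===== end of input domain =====

-- B computes the removal set once (set(stop_list).intersection(process[0])) and rebuilds the two dicts by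
-- one comprehension each, instead of A's collect-then-delete loops (alternative decomposition, same cost class).
-- Both Pythons mutate the caller's list/dicts (A deletes entries in place, B reassigns slots 0 and 1);
-- the equivalence proved here is about the RETURN value only.


-- ===== PORT A =====
-- dicts are assoc lists with unique keys; 'del d[term]' is ported as filtering out the pairs with that key
-- (exact for a Python dict, whose keys are unique). process[0] / process[1] are read via headD/getD;
-- Pre_ excludes the inputs where the Python indexing or 'del' would raise.
def stop_word_processing (process : List (List (String × Int))) (stop_list : List String) : List (List (String × Int)) :=
  let d0 := process.headD []
  let stop_words_in_index :=
    d0.foldl (fun acc term => if stop_list.contains term.1 then acc ++ [term.1] else acc) []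
  let st := stop_words_in_index.foldl
      (fun (s : List (String × Int) × List (String × Int)) term =>
        (s.1.filter (fun p => p.1 != term), s.2.filter (fun p => p.1 != term)))
      (d0, process.getD 1 [])
  match process with
  | [] => []
  | [_] => [st.1]
  | _ :: _ :: rest => st.1 :: st.2 :: rest

-- ===== PORT B =====
-- removed = set(stop_list).intersection(process[0]) (only membership and emptiness of the set are used,
-- so Python's set iteration order cannot affect the result); the two dict comprehensions are filters.
def stop_word_processing_alt (process : List (List (String × Int))) (stop_list : List String) : List (List (String × Int)) :=
  let removed : PySem.Set String :=
    PySem.Set.inter (PySem.Set.ofList stop_list) ((process.headD []).map Prod.fst)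
  if removed.isEmpty then process
  else
    let new0 := (process.headD []).filter (fun p => !removed.contains p.1)
    let new1 := (process.getD 1 []).filter (fun p => !removed.contains p.1)
    match process with
    | [] => []
    | [_] => [new0]
    | _ :: _ :: rest => new0 :: new1 :: rest

-- ===== PRECONDITION & SPEC =====
-- Pre_ = exactly the inputs where Python A returns: process nonempty (else IndexError on process[0]),
-- and every key of process[0] that is a stop word requires process[1] to exist (else IndexError)
-- and to contain that key (else KeyError on 'del process[1][term]').
def Pre_stop_word_processing (process : List (List (String × Int))) (stop_list : List String) : Prop :=
  process ≠ [] ∧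
  ∀ k ∈ (process.headD []).map Prod.fst, k ∈ stop_list →
    1 < process.length ∧ k ∈ (process.getD 1 []).map Prod.fst
instance (process : List (List (String × Int))) (stop_list : List String) : Decidable (Pre_stop_word_processing process stop_list) := by unfold Pre_stop_word_processing; infer_instance
def pvWitness_stop_word_processing : (List (List (String × Int))) × List String :=
  ([[("a", 1), ("b", 2)], [("a", 3)]], ["a"])

def Spec_stop_word_processing (process : List (List (String × Int))) (stop_list : List String) (out : List (List (String × Int))) : Prop := out = stop_word_processing_alt process stop_list
instance (process : List (List (String × Int))) (stop_list : List String) (out : List (List (String × Int))) : Decidable (Spec_stop_word_processing process stop_list out) := by unfold Spec_stop_word_processing; infer_instance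

-- ===== CLAIM (what is proved, stated in full; the proofs are below) =====
def Claim_equal_stop_word_processing : Prop := ∀ (process : List (List (String × Int))) (stop_list : List String), Dom_stop_word_processing process stop_list → Pre_stop_word_processing process stop_list → Spec_stop_word_processing process stop_list (stop_word_processing process stop_list)

-- ===== LEMMAS AND PROOFS =====

-- keys of d0, as a Bool membership test
def pvK (d0 : List (String × Int)) (k : String) : Bool := (d0.map Prod.fst).contains k

lemma swFold (d0 : List (String × Int)) (stop_list : List String) : ∀ acc : List String,
    d0.foldl (fun acc term => if stop_list.contains term.1 then acc ++ [term.1] else acc) acc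
    = acc ++ (d0.filter (fun p => stop_list.contains p.1)).map Prod.fst := by
  induction d0 with
  | nil => intro acc; simp
  | cons p d0 ih =>
    intro acc
    simp only [List.foldl_cons]
    by_cases h : stop_list.contains p.1 = true
    · have h' : p.1 ∈ stop_list := by simpa using h
      rw [if_pos h, ih]; simp [h']
    · have h' : ¬ p.1 ∈ stop_list := by simpa using h
      rw [if_neg h, ih]; simp [h']

lemma eraseFold (ts : List String) : ∀ (d0 d1 : List (String × Int)),
    ts.foldl (fun (s : List (String × Int) × List (String × Int)) term =>
        (s.1.filter (fun p => p.1 != term), s.2.filter (fun p => p.1 != term))) (d0, d1)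
    = (d0.filter (fun p => !ts.contains p.1), d1.filter (fun p => !ts.contains p.1)) := by
  induction ts with
  | nil => intro d0 d1; simp
  | cons t ts ih =>
    intro d0 d1
    simp only [List.foldl_cons, ih, List.filter_filter, Prod.mk.injEq]
    refine ⟨?_, ?_⟩ <;>
      (apply List.filter_congr; intro p _;
       by_cases h1 : p.1 = t <;> by_cases h2 : p.1 ∈ ts <;> simp [h1, h2])

lemma sw_contains (d0 : List (String × Int)) (stop_list : List String) (k : String) :
    ((d0.filter (fun p => stop_list.contains p.1)).map Prod.fst).contains k
    = ((d0.map Prod.fst).contains k && stop_list.contains k) := by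
  rw [Bool.eq_iff_iff]
  simp only [List.contains_eq_mem, List.mem_map, List.mem_filter, decide_eq_true_iff,
    Bool.and_eq_true]
  constructor
  · rintro ⟨q, ⟨hq, hs⟩, rfl⟩
    exact ⟨⟨q, hq, rfl⟩, by simpa using hs⟩
  · rintro ⟨⟨q, hq, rfl⟩, hs⟩
    exact ⟨q, ⟨hq, by simpa using hs⟩, rfl⟩

lemma removed_contains (d0 : List (String × Int)) (stop_list : List String) (k : String) :
    (PySem.Set.inter (PySem.Set.ofList stop_list) (d0.map Prod.fst)).contains k
    = (stop_list.contains k && pvK d0 k) := by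
  rw [Bool.eq_iff_iff]
  simp [PySem.Set.mem_inter, PySem.Set.mem_ofList, pvK, List.contains_eq_mem]

lemma filtA (d0 d : List (String × Int)) (stop_list : List String) :
    d.filter (fun p => !((d0.filter (fun q => stop_list.contains q.1)).map Prod.fst).contains p.1)
    = d.filter (fun p => !(stop_list.contains p.1 && pvK d0 p.1)) := by
  apply List.filter_congr; intro p _
  rw [sw_contains, pvK, Bool.and_comm]

lemma filtB (d0 d : List (String × Int)) (stop_list : List String) :
    d.filter (fun p => !(PySem.Set.inter (PySem.Set.ofList stop_list) (d0.map Prod.fst)).contains p.1)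
    = d.filter (fun p => !(stop_list.contains p.1 && pvK d0 p.1)) := by
  apply List.filter_congr; intro p _
  rw [removed_contains]

lemma filt_id (d0 : List (String × Int)) (stop_list : List String)
    (he : (PySem.Set.inter (PySem.Set.ofList stop_list) (d0.map Prod.fst)).isEmpty)
    (d : List (String × Int)) :
    d.filter (fun p => !(stop_list.contains p.1 && pvK d0 p.1)) = d := by
  apply List.filter_eq_self.mpr
  intro p _
  have h := removed_contains d0 stop_list p.1
  rw [List.isEmpty_iff.mp he] at h
  have h2 : (stop_list.contains p.1 && pvK d0 p.1) = false := by rw [← h]; rfl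
  by_cases hs : p.1 ∈ stop_list
  · simp at h2
    simp [h2 hs]
  · simp [hs]

lemma ports_eq_core (d0 d1 : List (String × Int)) (stop_list : List String) :
    (stop_word_processing [d0, d1] stop_list = stop_word_processing_alt [d0, d1] stop_list) ∧
    (stop_word_processing [d0] stop_list = stop_word_processing_alt [d0] stop_list) := by
  constructor
  · simp only [stop_word_processing, stop_word_processing_alt, List.headD, List.getD,
      List.getElem?_cons_succ, List.getElem?_cons_zero, Option.getD_some,
      swFold, List.nil_append, eraseFold, filtA]
    by_cases he : (PySem.Set.inter (PySem.Set.ofList stop_list) (d0.map Prod.fst)).isEmpty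
    · rw [if_pos he]; simp only [filt_id d0 stop_list he]
    · rw [if_neg he]; simp only [filtB]
  · simp only [stop_word_processing, stop_word_processing_alt, List.headD, List.getD,
      List.getElem?_cons_succ, List.getElem?_nil, Option.getD_none,
      swFold, List.nil_append, eraseFold, filtA]
    by_cases he : (PySem.Set.inter (PySem.Set.ofList stop_list) (d0.map Prod.fst)).isEmpty
    · rw [if_pos he]; simp only [filt_id d0 stop_list he]
    · rw [if_neg he]; simp only [filtB]

lemma ports_eq (process : List (List (String × Int))) (stop_list : List String) :
    stop_word_processing process stop_list = stop_word_processing_alt process stop_list := by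
  match process with
  | [] => simp [stop_word_processing, stop_word_processing_alt]
  | [d0] => exact (ports_eq_core d0 [] stop_list).2
  | d0 :: d1 :: rest =>
    have h := (ports_eq_core d0 d1 stop_list).1
    simp only [stop_word_processing, stop_word_processing_alt, List.headD, List.getD,
      List.getElem?_cons_succ, List.getElem?_cons_zero, Option.getD_some] at h ⊢
    by_cases he : (PySem.Set.inter (PySem.Set.ofList stop_list) (d0.map Prod.fst)).isEmpty
    · rw [if_pos he] at h ⊢
      injection h with h1 h2
      injection h2 with h2 _
      rw [h1, h2]
    · rw [if_neg he] at h ⊢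
      injection h with h1 h2
      injection h2 with h2 _
      rw [h1, h2]

-- ===== VERDICT (by name: the statement is the Claim_ definition above) =====
theorem stop_word_processing_spec : Claim_equal_stop_word_processing := by
  intro process stop_list _ _
  unfold Spec_stop_word_processing
  exact ports_eq process stop_list
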